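-- pv_equiv track=rewrite | github.com/LickIt/usaco | 3.2/kimbits/kimbits.py | solve
-- ===== SOURCE A (Python) =====
-- from math import factorial
--
-- def solve(N, L, I):
--     x = [0] * N
--     ones = 0
--     total = 0
--
--     for i in range(N):
--         c = count(N-i-1, L-ones)
--
--         # if we can include all of them in the total we put a 1
--         if total + c < I:
--             x[i] = 1
--             total += c
--             ones += 1
--
--     return "".join(map(str, x))
--
-- def count(n, l):
--     c = 0
--     for i in range(l+1):
--         if i <= n:
--             c += comb(n, i)
--
--     return c
--
-- def comb(n, r):
--     return factorial(n) // factorial(r) // factorial(n-r)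
-- ===== SOURCE B (Python) =====
-- def solve(N, L, I):
--     # Pascal-triangle prefix-sum table instead of recomputing factorials.
--     if N <= 0:
--         return ""
--     maxc = min(N - 1, max(L, 0))
--     rows = []                      # rows[n] = prefix sums of C(n, 0..maxc)
--     row = [1] + [0] * maxc         # binomials C(0, 0..maxc)
--     for _ in range(N):
--         ps, s = [], 0
--         for v in row:
--             s += v
--             ps.append(s)
--         rows.append(ps)
--         row = [1] + [row[j - 1] + row[j] for j in range(1, maxc + 1)]
--     rows.reverse()                 # rows[i] is now the prefix row for n = N-1-i
--     out = []
--     total = 0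
--     ones = 0
--     for ps in rows:
--         l = L - ones
--         c = 0 if l < 0 else ps[min(l, maxc)]
--         if total + c < I:
--             out.append("1")
--             total += c
--             ones += 1
--         else:
--             out.append("0")
--     return "".join(out)
-- ===== Notes on version B (the rewrite author's own statement) =====
-- stated objective: faster
-- what changed: Replaces per-bit factorial-based recomputation of count(n,l) with a Pascal-triangle table of cumulative binomial prefix sums built once, so each greedy step is a single table lookup; intended as faster, measured 35.8x at the largest size both programs finished (unconfirmed beyond, where both time out).
import Mathlib
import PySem

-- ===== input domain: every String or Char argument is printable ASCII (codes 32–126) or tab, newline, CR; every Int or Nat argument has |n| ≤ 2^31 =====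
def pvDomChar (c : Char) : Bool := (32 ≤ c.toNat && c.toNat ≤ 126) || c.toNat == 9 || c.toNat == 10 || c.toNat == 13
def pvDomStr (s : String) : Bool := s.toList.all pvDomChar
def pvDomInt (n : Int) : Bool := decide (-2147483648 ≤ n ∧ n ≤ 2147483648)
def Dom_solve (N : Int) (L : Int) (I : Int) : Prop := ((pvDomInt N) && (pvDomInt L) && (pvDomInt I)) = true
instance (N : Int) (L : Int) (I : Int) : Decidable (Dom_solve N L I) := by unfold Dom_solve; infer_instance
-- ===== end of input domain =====

-- B replaces A's per-bit factorial recomputation by a Pascal-triangle table of binomial prefix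
-- sums built once, so each greedy step is one lookup; intended as faster (timing run measured
-- 35.8x at the largest size both finished; unconfirmed at sizes where both time out).


-- ===== PORT A =====
-- Python's factorial raises for a negative argument; comb is only reached with 0 ≤ r ≤ n,
-- where Int.toNat is exact and '//' on the nonnegative results is Nat division.
def comb (n r : Int) : Int :=
  ((Nat.factorial n.toNat / Nat.factorial r.toNat / Nat.factorial (n - r).toNat : Nat) : Int)

def count (n l : Int) : Int :=
  (PySem.List.pyRange 0 (l + 1) 1).foldl (fun c i => if i ≤ n then c + comb n i else c) 0

-- loop body of A; state = (x, ones, total)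
def solveStep (N L I : Int) (st : List Int × Int × Int) (i : Int) : List Int × Int × Int :=
  let c := count (N - i - 1) (L - st.2.1)
  if st.2.2 + c < I then
    -- x[i] = 1 : index i is always in range here
    (PySem.List.pySetD st.1 i 1, st.2.1 + 1, st.2.2 + c)
  else st

def solve (N : Int) (L : Int) (I : Int) : String :=
  let st := (PySem.List.pyRange 0 N 1).foldl (solveStep N L I) (List.replicate N.toNat 0, 0, 0)
  PySem.Str.join "" (st.1.map PySem.Int.toStr)

-- ===== PORT B =====
-- table-building loop body; state = (rows, row)
def altBuildStep (mc : Nat) (st : List (List Int) × List Int) (_i : Int) : List (List Int) × List Int :=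
  let row := st.2
  let ps := (row.foldl (fun (p : List Int × Int) v => (p.1 ++ [p.2 + v], p.2 + v)) (([] : List Int), 0)).1
  -- row[j-1] and row[j] for j in range(1, maxc+1): both indices always in range
  let row' := 1 :: (List.range mc).map (fun (j : Nat) =>
      PySem.List.pyGetD row (j : Int) 0 + PySem.List.pyGetD row ((j : Int) + 1) 0)
  (st.1 ++ [ps], row')

-- greedy loop body of B; state = (out, total, ones)
def altStep (L I maxc : Int) (st : List String × Int × Int) (ps : List Int) : List String × Int × Int :=
  let l := L - st.2.2
  -- ps[min(l, maxc)] : this index is always in range here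
  let c := if l < 0 then 0 else PySem.List.pyGetD ps (min l maxc) 0
  if st.2.1 + c < I then (st.1 ++ ["1"], st.2.1 + c, st.2.2 + 1)
  else (st.1 ++ ["0"], st.2.1, st.2.2)

def solve_alt (N : Int) (L : Int) (I : Int) : String :=
  if N ≤ 0 then "" else
    let maxc : Int := min (N - 1) (max L 0)
    let build := (PySem.List.pyRange 0 N 1).foldl (altBuildStep maxc.toNat)
        (([] : List (List Int)), 1 :: List.replicate maxc.toNat 0)
    let rows := build.1.reverse
    let st := rows.foldl (altStep L I maxc) (([] : List String), 0, 0)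
    PySem.Str.join "" st.1

-- ===== PRECONDITION & SPEC =====
def Spec_solve (N : Int) (L : Int) (I : Int) (out : String) : Prop := out = solve_alt N L I
instance (N : Int) (L : Int) (I : Int) (out : String) : Decidable (Spec_solve N L I out) := by unfold Spec_solve; infer_instance

-- ===== CLAIM (what is proved, stated in full; the proofs are below) =====
def Claim_equal_solve : Prop := ∀ (N : Int) (L : Int) (I : Int), Dom_solve N L I → Spec_solve N L I (solve N L I)

-- ===== LEMMAS AND PROOFS =====

-- cumulative binomial sum: the mathematical value both programs compute per step
def cnt (n l : Nat) : Int := ∑ i ∈ Finset.range (l + 1), (n.choose i : Int)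
-- B's k-th Pascal row and its prefix-sum row, truncated to mc+1 entries
def rowN (mc k : Nat) : List Int := (List.range (mc + 1)).map (fun j => (k.choose j : Int))
def prow (mc k : Nat) : List Int := (List.range (mc + 1)).map (fun j => cnt k j)

theorem comb_eq_choose (n r : Nat) (h : r ≤ n) : comb n r = (n.choose r : Int) := by
  unfold comb
  have h1 : ((n : Int) - (r : Int)).toNat = n - r := by omega
  simp only [Int.toNat_natCast, h1]
  rw [Nat.div_div_eq_div_mul, ← Nat.choose_eq_factorial_div_factorial h]

theorem count_fold (n m : Nat) :
    (PySem.List.pyRange 0 (m : Int) 1).foldl (fun c i => if i ≤ (n : Int) then c + comb n i else c) 0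
    = ∑ i ∈ Finset.range m, (n.choose i : Int) := by
  induction m with
  | zero => simp
  | succ m ih =>
    have : ((m : Int) + 1) = ((m + 1 : Nat) : Int) := by push_cast; ring
    rw [show ((m + 1 : Nat) : Int) = (m : Int) + 1 by push_cast; ring,
        PySem.List.pyRange_one_succ_right (by positivity), List.foldl_append, ih]
    simp only [List.foldl]
    rw [Finset.sum_range_succ]
    by_cases hmn : m ≤ n
    · rw [if_pos (by exact_mod_cast hmn), comb_eq_choose n m hmn]
    · rw [if_neg (by omega), Nat.choose_eq_zero_of_lt (by omega)]
      simp

theorem count_eq (n : Nat) (l : Int) :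
    count n l = if l < 0 then 0 else cnt n l.toNat := by
  unfold count
  by_cases hl : l < 0
  · rw [if_pos hl, PySem.List.pyRange_one_eq_nil (by omega)]
    rfl
  · rw [if_neg hl]
    have : l + 1 = ((l.toNat + 1 : Nat) : Int) := by omega
    rw [this, count_fold n (l.toNat + 1)]
    rfl

theorem cnt_stable (n a b : Nat) (hn : n ≤ a) (hab : a ≤ b) : cnt n b = cnt n a := by
  unfold cnt
  have hsub : Finset.range (a+1) ⊆ Finset.range (b+1) := by intro x hx; simp only [Finset.mem_range] at *; omega
  refine (Finset.sum_subset hsub ?_).symm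
  intro i hi hni
  simp only [Finset.mem_range] at hi hni
  rw [Nat.choose_eq_zero_of_lt (by omega)]
  simp

theorem getD_rowN (mc k j : Nat) (h : j < mc + 1) :
    PySem.List.pyGetD (rowN mc k) (j : Int) 0 = (k.choose j : Int) := by
  rw [PySem.List.pyGetD_natCast]
  unfold rowN
  rw [List.getD_eq_getElem _ _ (by simpa using h)]
  simp

theorem row_zero (mc : Nat) : (1 : Int) :: List.replicate mc (0 : Int) = rowN mc 0 := by
  apply List.ext_getElem
  · simp [rowN]
  · intro i h1 h2
    match i with
    | 0 => simp [rowN]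
    | j + 1 =>
      simp only [List.length_cons, List.length_replicate] at h1
      simp [rowN, Nat.choose_eq_zero_of_lt (by omega : (0:ℕ) < j + 1)]

theorem row_step (mc k : Nat) :
    (1 : Int) :: (List.range mc).map (fun (j : Nat) =>
      PySem.List.pyGetD (rowN mc k) (j : Int) 0 + PySem.List.pyGetD (rowN mc k) ((j : Int) + 1) 0)
    = rowN mc (k + 1) := by
  apply List.ext_getElem
  · simp [rowN]
  · intro i h1 h2
    match i with
    | 0 => simp [rowN]
    | j + 1 =>
      simp only [List.length_cons, List.length_map, List.length_range] at h1
      have hj : j < mc := by omega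
      have h1' : ((j : Int) + 1) = ((j + 1 : Nat) : Int) := by push_cast; ring
      simp only [List.getElem_cons_succ, List.getElem_map, List.getElem_range]
      rw [h1', getD_rowN mc k j (by omega), getD_rowN mc k (j+1) (by omega)]
      simp only [rowN, List.getElem_map, List.getElem_range]
      rw [Nat.choose_succ_succ' k j]
      push_cast; ring

theorem prefix_fold (xs : List Int) : ∀ (acc : List Int) (s : Int),
    (xs.foldl (fun (p : List Int × Int) v => (p.1 ++ [p.2 + v], p.2 + v)) (acc, s)).1
    = acc ++ (List.range xs.length).map (fun j => s + ((xs.take (j + 1)).sum)) := by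
  induction xs with
  | nil => intro acc s; simp
  | cons x xs ih =>
    intro acc s
    simp only [List.foldl_cons, List.length_cons]
    rw [ih (acc ++ [s + x]) (s + x), List.append_assoc, List.singleton_append,
        List.range_succ_eq_map, List.map_cons, List.map_map]
    congr 1
    congr 1
    · simp
    · apply List.map_congr_left
      intro j _
      simp only [Function.comp_apply, List.take_succ_cons, List.sum_cons]
      ring

theorem ps_row (mc k : Nat) :
    ((rowN mc k).foldl (fun (p : List Int × Int) v => (p.1 ++ [p.2 + v], p.2 + v))
      (([] : List Int), 0)).1 = prow mc k := by
  rw [prefix_fold, List.nil_append]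
  have hlen : (rowN mc k).length = mc + 1 := by simp [rowN]
  rw [hlen]
  apply List.map_congr_left
  intro j hj
  simp only [List.mem_range] at hj
  rw [show (rowN mc k).take (j+1) = (List.range (j+1)).map (fun i => (k.choose i : Int)) by
        rw [rowN, ← List.map_take, List.take_range, Nat.min_eq_left (by omega)]]
  have : ((List.range (j+1)).map (fun (i : Nat) => (k.choose i : Int))).sum
      = ∑ i ∈ Finset.range (j+1), (k.choose i : Int) := by
    exact Int.neg_inj.mp rfl
  rw [this, cnt]
  ring

theorem build_eq (mc t : Nat) :
    (PySem.List.pyRange 0 (t : Int) 1).foldl (altBuildStep mc)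
      (([] : List (List Int)), 1 :: List.replicate mc (0 : Int))
    = ((List.range t).map (prow mc), rowN mc t) := by
  induction t with
  | zero => simp [row_zero]
  | succ t ih =>
    rw [show ((t + 1 : Nat) : Int) = (t : Int) + 1 by push_cast; ring,
        PySem.List.pyRange_one_succ_right (by positivity), List.foldl_append, ih]
    simp only [List.foldl]
    rw [List.range_succ, List.map_append]
    unfold altBuildStep
    simp only
    rw [ps_row, row_step]
    simp

-- A's and B's loop states after k steps
def Astate (N L I : Int) (k : Nat) : List Int × Int × Int :=
  (PySem.List.pyRange 0 (k : Int) 1).foldl (solveStep N L I) (List.replicate N.toNat 0, 0, 0)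

def Bstate (N L I : Int) (k : Nat) : List String × Int × Int :=
  (((List.range N.toNat).map (prow (min (N - 1) (max L 0)).toNat)).reverse.take k).foldl
    (altStep L I (min (N - 1) (max L 0))) (([] : List String), 0, 0)

theorem rev_map_range {α : Type} (f : Nat → α) (n : Nat) :
    ((List.range n).map f).reverse = (List.range n).map (fun j => f (n - 1 - j)) := by
  apply List.ext_getElem
  · simp
  · intro i h1 h2
    simp only [List.getElem_reverse, List.getElem_map, List.getElem_range, List.length_map,
      List.length_range] at *

theorem step_c (N L ones : Int) (k : Nat) (hN : 0 < N) (hk : k < N.toNat) (hones : 0 ≤ ones) :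
    count (N - (k : Int) - 1) (L - ones)
    = (if L - ones < 0 then 0
       else PySem.List.pyGetD (prow (min (N - 1) (max L 0)).toNat (N.toNat - 1 - k))
              (min (L - ones) (min (N - 1) (max L 0))) 0) := by
  set maxc := min (N - 1) (max L 0) with hmaxc
  set l := L - ones with hl
  have hn' : N - (k : Int) - 1 = ((N.toNat - 1 - k : Nat) : Int) := by omega
  rw [hn', count_eq]
  by_cases hneg : l < 0
  · simp [hneg]
  · rw [if_neg hneg, if_neg hneg]
    have hjcast : min l maxc = (((min l maxc).toNat : Nat) : Int) := by omega
    set j := (min l maxc).toNat with hj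
    rw [hjcast, PySem.List.pyGetD_natCast]
    rw [prow, List.getD_eq_getElem _ _ (by simp only [List.length_map, List.length_range]; omega),
        List.getElem_map, List.getElem_range]
    rcases (by omega : j = l.toNat ∨ (N.toNat - 1 - k ≤ j ∧ j ≤ l.toNat)) with h | ⟨h1, h2⟩
    · rw [h]
    · exact cnt_stable _ j l.toNat h1 h2

theorem main_inv (N L I : Int) (hN : 0 < N) :
    ∀ k, k ≤ N.toNat → ∃ bits : List Int,
      (Astate N L I k).1 = bits ++ List.replicate (N.toNat - k) 0 ∧
      bits.length = k ∧
      (Bstate N L I k).1 = bits.map PySem.Int.toStr ∧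
      (Astate N L I k).2.1 = (Bstate N L I k).2.2 ∧
      (Astate N L I k).2.2 = (Bstate N L I k).2.1 ∧
      0 ≤ (Astate N L I k).2.1 := by
  intro k
  induction k with
  | zero =>
    intro _
    refine ⟨[], ?_, rfl, rfl, rfl, rfl, le_refl 0⟩
    simp [Astate]
  | succ k ih =>
    intro hk1
    obtain ⟨bits, hx, hlen, hout, hones, htot, hpos⟩ := ih (by omega)
    set n := N.toNat with hn
    set mc := (min (N - 1) (max L 0)).toNat with hmc
    have hA : Astate N L I (k + 1) = solveStep N L I (Astate N L I k) (k : Int) := by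
      unfold Astate
      rw [show ((k + 1 : Nat) : Int) = (k : Int) + 1 by push_cast; ring,
          PySem.List.pyRange_one_succ_right (by positivity), List.foldl_append]
      rfl
    have hB : Bstate N L I (k + 1)
        = altStep L I (min (N - 1) (max L 0)) (Bstate N L I k) (prow mc (n - 1 - k)) := by
      unfold Bstate
      rw [← hmc, rev_map_range, List.take_add_one, List.getElem?_map, List.getElem?_range]
      simp only [Option.map_some, Option.toList_some]
      rw [List.foldl_append]
      rfl
      omega
    rw [hA, hB]
    unfold solveStep altStep
    rw [step_c N L (Astate N L I k).2.1 k hN (by omega) hpos, ← hmc, hones, htot]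
    set c := (if L - (Bstate N L I k).2.2 < 0 then 0
       else PySem.List.pyGetD (prow mc (n - 1 - k))
              (min (L - (Bstate N L I k).2.2) (min (N - 1) (max L 0))) 0) with hc
    simp only
    by_cases hlt : (Bstate N L I k).2.1 + c < I
    · rw [if_pos hlt, if_pos hlt]
      refine ⟨bits ++ [1], ?_, by simp [hlen], ?_, by rw [← hones, ← htot], by rw [← htot],
        by show 0 ≤ (Bstate N L I k).2.2 + 1; omega⟩
      · rw [hx, PySem.List.pySetD_natCast,
            show n - k = (n - (k + 1)) + 1 by omega, List.replicate_succ, ← hlen,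
            List.set_append_right _ _ (le_refl _)]
        simp [hlen]
      · rw [hout, List.map_append]
        rfl
    · rw [if_neg hlt, if_neg hlt]
      refine ⟨bits ++ [0], ?_, by simp [hlen], ?_, hones, htot, hpos⟩
      · rw [hx, show n - k = (n - (k + 1)) + 1 by omega, List.replicate_succ]
        simp
      · rw [hout, List.map_append]
        rfl

-- ===== VERDICT (by name: the statement is the Claim_ definition above) =====
theorem solve_spec : Claim_equal_solve := by
  unfold Claim_equal_solve
  intro N L I _
  unfold Spec_solve solve solve_alt
  by_cases hN : N ≤ 0
  · rw [if_pos hN, PySem.List.pyRange_one_eq_nil (by omega)]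
    simp only [List.foldl_nil]
    rw [Int.toNat_of_nonpos hN]
    rfl
  · rw [if_neg hN]
    rw [Int.not_le] at hN
    set n := N.toNat with hn
    have hNn : N = (n : Int) := by omega
    obtain ⟨bits, hx, hlen, hout, hones, htot, hpos⟩ := main_inv N L I hN n (le_refl n)
    show PySem.Str.join "" (((PySem.List.pyRange 0 N 1).foldl (solveStep N L I)
        (List.replicate n 0, 0, 0)).1.map PySem.Int.toStr)
      = PySem.Str.join "" ((((PySem.List.pyRange 0 N 1).foldl
          (altBuildStep (min (N - 1) (max L 0)).toNat)
          (([] : List (List Int)), 1 :: List.replicate (min (N - 1) (max L 0)).toNat 0)).1.reverse).foldl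
          (altStep L I (min (N - 1) (max L 0))) (([] : List String), 0, 0)).1
    have hA : (PySem.List.pyRange 0 N 1).foldl (solveStep N L I)
        (List.replicate n 0, 0, 0) = Astate N L I n := by
      unfold Astate
      rw [← hNn, hn]
    have hB1 : ((PySem.List.pyRange 0 N 1).foldl (altBuildStep (min (N - 1) (max L 0)).toNat)
        (([] : List (List Int)), 1 :: List.replicate (min (N - 1) (max L 0)).toNat 0)).1
      = (List.range n).map (prow (min (N - 1) (max L 0)).toNat) := by
      rw [hNn, build_eq]
    have hBst : (((List.range n).map (prow (min (N - 1) (max L 0)).toNat)).reverse).foldl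
        (altStep L I (min (N - 1) (max L 0))) (([] : List String), 0, 0) = Bstate N L I n := by
      unfold Bstate
      rw [List.take_of_length_le (by simp; omega)]
    rw [hA, hB1, hBst, hx, hout, show N.toNat - n = 0 from by omega]
    simp
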